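-- pv_equiv track=rewrite | github.com/amal628/AI-Powered-Video-Shortner | backend/app/services/highlight_selector.py | detect_topic_boundaries
-- ===== SOURCE A (Python) =====
-- from typing import List, Tuple, Dict, Any, Optional
--
-- TRANSITION_PHRASES = [
--     "now let's", "moving on", "next up", "another thing",
--     "on the other hand", "in addition", "furthermore",
--     "most importantly", "above all", "in conclusion"
-- ]
--
-- def detect_topic_boundaries(segments: List[Dict]) -> List[int]:
--     """
--     Detect indices where topic changes occur.
--     These are good candidates for highlight boundaries.
--     """
--     boundary_indices = []
--
--     for i, segment in enumerate(segments):
--         text = segment.get("text", "").lower()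
--
--         # Check for transition phrases
--         for phrase in TRANSITION_PHRASES:
--             if phrase in text:
--                 boundary_indices.append(i)
--                 break
--
--     return boundary_indices
-- ===== SOURCE B (Python) =====
-- from typing import List, Dict
--
-- TRANSITION_PHRASES = [
--     "now let's", "moving on", "next up", "another thing",
--     "on the other hand", "in addition", "furthermore",
--     "most importantly", "above all", "in conclusion"
-- ]
--
-- # Index the phrases once by their first character: at each text position only
-- # the phrases starting with that character are tried with startswith.
-- _BY_FIRST: Dict[str, list] = {}
-- for _p in TRANSITION_PHRASES:
--     _BY_FIRST.setdefault(_p[0], []).append(_p)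
--
--
-- def _has_transition(text: str) -> bool:
--     for j in range(len(text)):
--         for p in _BY_FIRST.get(text[j], ()):
--             if text.startswith(p, j):
--                 return True
--     return False
--
--
-- def detect_topic_boundaries(segments: List[Dict]) -> List[int]:
--     return [i for i, seg in enumerate(segments)
--             if _has_transition(seg.get("text", "").lower())]
-- ===== Notes on version B (the rewrite author's own statement) =====
-- stated objective: alternative
-- what changed: Instead of testing each transition phrase with a separate substring search ('phrase in text'), B builds once a dictionary indexing the phrases by their first character and makes a single left-to-right scan of each lowercased text, trying startswith only for the phrases filed under the current character.
import Mathlib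
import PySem

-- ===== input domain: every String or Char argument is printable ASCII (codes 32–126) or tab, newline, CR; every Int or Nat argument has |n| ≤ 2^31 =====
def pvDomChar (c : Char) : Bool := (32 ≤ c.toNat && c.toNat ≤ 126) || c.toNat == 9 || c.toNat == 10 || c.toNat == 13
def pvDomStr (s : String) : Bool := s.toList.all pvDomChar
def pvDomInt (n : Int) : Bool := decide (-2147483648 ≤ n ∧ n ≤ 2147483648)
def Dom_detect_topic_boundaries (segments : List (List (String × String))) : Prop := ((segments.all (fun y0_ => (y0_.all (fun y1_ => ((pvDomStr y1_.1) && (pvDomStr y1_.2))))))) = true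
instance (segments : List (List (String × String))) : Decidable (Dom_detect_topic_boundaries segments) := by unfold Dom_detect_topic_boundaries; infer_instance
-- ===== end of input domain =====

-- B replaces A's per-phrase substring searches by one left-to-right scan of the text that,
-- at each position, tries only the phrases indexed (once, up front) by their first character
-- (objective: alternative — a first-character index instead of repeated 'in' searches).

-- ===== PORT A =====
def pvPhrases : List String :=
  ["now let's", "moving on", "next up", "another thing",
   "on the other hand", "in addition", "furthermore",
   "most importantly", "above all", "in conclusion"]

-- A's inner 'for phrase in TRANSITION_PHRASES: if phrase in text: append; break'
-- as the question 'did some phrase match' (the break = stop at the first hit).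
def pvCheckPhrases : List String → String → Bool
  | [], _ => false
  | p :: ps, text => if PySem.Str.isIn p text then true else pvCheckPhrases ps text

def detect_topic_boundaries (segments : List (List (String × String))) : List Int :=
  (PySem.List.enumerate segments 0).foldl
    (fun acc iseg =>
      if pvCheckPhrases pvPhrases (PySem.Str.lower (PySem.Dict.getD ⟨iseg.2⟩ "text" ""))
      then acc ++ [iseg.1] else acc) []

-- ===== PORT B =====
-- module-level loop: _BY_FIRST.setdefault(p[0], []).append(p)
def pvByFirst : PySem.Dict Char (List String) :=
  pvPhrases.foldl (fun d p => d.modify (p.toList.headD ' ') [] (· ++ [p])) PySem.Dict.empty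

-- _has_transition: for j over the positions of text (here: its suffixes, left to right),
-- try only the phrases filed under text[j]; text.startswith(p, j) is startswith on the suffix.
def pvScan : List Char → Bool
  | [] => false
  | c :: rest =>
    if (pvByFirst.getD c []).any (fun p => PySem.Chars.startswith (c :: rest) p.toList)
    then true else pvScan rest

def detect_topic_boundaries_alt (segments : List (List (String × String))) : List Int :=
  ((PySem.List.enumerate segments 0).filter
    (fun iseg => pvScan (PySem.Str.lower (PySem.Dict.getD ⟨iseg.2⟩ "text" "")).toList)).map (·.1)

-- ===== PRECONDITION & SPEC =====
def Spec_detect_topic_boundaries (segments : List (List (String × String))) (out : List Int) : Prop := out = detect_topic_boundaries_alt segments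
instance (segments : List (List (String × String))) (out : List Int) : Decidable (Spec_detect_topic_boundaries segments out) := by unfold Spec_detect_topic_boundaries; infer_instance

-- ===== CLAIM (what is proved, stated in full; the proofs are below) =====
def Claim_equal_detect_topic_boundaries : Prop := ∀ (segments : List (List (String × String))), Dom_detect_topic_boundaries segments → Spec_detect_topic_boundaries segments (detect_topic_boundaries segments)

-- ===== LEMMAS AND PROOFS =====

-- the first-character index, written out (a proof-side restatement of pvByFirst).
def pvIdx : List (Char × List String) :=
  [('n', ["now let's","next up"]), ('m', ["moving on","most importantly"]),
   ('a', ["another thing","above all"]), ('o', ["on the other hand"]),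
   ('i', ["in addition","in conclusion"]), ('f', ["furthermore"])]

theorem pvByFirst_eq : pvByFirst = ⟨pvIdx⟩ := by decide

-- A's break-loop is 'some phrase occurs'.
theorem pvCheckPhrases_eq_any (ps : List String) (t : String) :
    pvCheckPhrases ps t = ps.any (fun p => PySem.Str.isIn p t) := by
  induction ps with
  | nil => rfl
  | cons p ps ih =>
    simp only [pvCheckPhrases, List.any_cons]
    cases h : PySem.Str.isIn p t
    · simp [ih]
    · simp

-- membership in the first-character index (computed through the ten modifies).
theorem pvByFirst_mem (c : Char) (p : String) :
    p ∈ pvByFirst.getD c [] ↔ p ∈ pvPhrases ∧ p.toList.headD ' ' = c := by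
  constructor
  · intro hmem
    rw [pvByFirst_eq] at hmem
    simp only [PySem.Dict.getD, PySem.Dict.get?] at hmem
    cases hf : List.find? (fun q => q.1 == c) (PySem.Dict.mk (ν := List String) pvIdx).items with
    | none => rw [hf] at hmem; simp at hmem
    | some kv =>
      rw [hf] at hmem
      simp only [Option.map_some, Option.getD_some] at hmem
      have hk := List.find?_some hf
      have hin : kv ∈ (PySem.Dict.mk (ν := List String) pvIdx).items := List.mem_of_find?_eq_some hf
      simp only [beq_iff_eq] at hk
      subst hk
      fin_cases hin <;> simp_all [pvIdx, pvPhrases] <;> rcases hmem with rfl | rfl <;> decide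
  · rintro ⟨hp, hh⟩
    subst hh
    fin_cases hp <;> decide

theorem pvPhrases_ne_nil : ∀ p ∈ pvPhrases, p.toList ≠ [] := by decide

-- B's scan finds a phrase iff some phrase is an infix of the text.
theorem pvScan_iff (s : List Char) :
    pvScan s = true ↔ ∃ p ∈ pvPhrases, p.toList <:+: s := by
  induction s with
  | nil =>
    simp only [pvScan]
    constructor
    · intro h; cases h
    · rintro ⟨p, hp, hinf⟩
      exact absurd (List.infix_nil.mp hinf) (pvPhrases_ne_nil p hp)
  | cons c rest ih =>
    simp only [pvScan]
    by_cases hany :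
        ((pvByFirst.getD c []).any (fun p => PySem.Chars.startswith (c :: rest) p.toList)) = true
    · simp only [hany, if_true, true_iff]
      rcases List.any_eq_true.mp hany with ⟨p, hpmem, hsw⟩
      exact ⟨p, (pvByFirst_mem c p).mp hpmem |>.1,
        ((PySem.Chars.startswith_iff _ _).mp hsw).isInfix⟩
    · simp only [hany, if_false, Bool.false_eq_true, ih]
      constructor
      · rintro ⟨p, hp, hinf⟩; exact ⟨p, hp, hinf.trans (List.suffix_cons c rest).isInfix⟩
      · rintro ⟨p, hp, hinf⟩
        rcases List.infix_cons_iff.mp hinf with hpre | hinf'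
        · exfalso
          have hne := pvPhrases_ne_nil p hp
          have hhead : p.toList.headD ' ' = c := by
            rcases List.exists_cons_of_ne_nil hne with ⟨a, as, ha⟩
            rcases hpre with ⟨t, ht⟩
            rw [ha] at ht ⊢
            simp only [List.cons_append] at ht
            simp only [List.cons.injEq] at ht
            simp [ht.1]
          have hpm : p ∈ pvByFirst.getD c [] := (pvByFirst_mem c p).mpr ⟨hp, hhead⟩
          exact hany (List.any_eq_true.mpr ⟨p, hpm,
            (PySem.Chars.startswith_iff _ _).mpr hpre⟩)
        · exact ⟨p, hp, hinf'⟩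

-- the two per-segment tests agree on every text.
theorem pvTest_eq (t : String) :
    pvCheckPhrases pvPhrases t = pvScan t.toList := by
  rw [Bool.eq_iff_iff, pvCheckPhrases_eq_any, List.any_eq_true, pvScan_iff]
  constructor
  · rintro ⟨p, hp, hin⟩; exact ⟨p, hp, (PySem.Str.isIn_iff_infix p t).mp hin⟩
  · rintro ⟨p, hp, hinf⟩; exact ⟨p, hp, (PySem.Str.isIn_iff_infix p t).mpr hinf⟩

-- ===== VERDICT (by name: the statement is the Claim_ definition above) =====
theorem detect_topic_boundaries_spec : Claim_equal_detect_topic_boundaries := by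
  intro segments _
  unfold Spec_detect_topic_boundaries detect_topic_boundaries detect_topic_boundaries_alt
  rw [PySem.List.foldl_append_if
    (fun iseg : Int × List (String × String) =>
      pvCheckPhrases pvPhrases (PySem.Str.lower (PySem.Dict.getD ⟨iseg.2⟩ "text" "")))
    (fun iseg => iseg.1)]
  simp only [List.nil_append]
  congr 1
  apply List.filter_congr
  intro x _
  exact pvTest_eq _
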